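-- pv_equiv track=rewrite | github.com/Saketneco/Neco-Projects | Project-2(Mail Automation)/Code/Mail_code_mysql.py | generate_birthday_cards
-- ===== SOURCE A (Python) =====
-- def generate_birthday_cards(birthday_data):
--     birthday_cards = ""
--     for index, person in enumerate(birthday_data):
--         card_html = f"""
--             <div style="margin: 10px; padding: 10px; background-color: rgba(255, 255, 255, 0.2); border-radius: 10px; width: 180px; text-align: center;">
--                 <h3 style="color: #FFD700;">Shri {person[0]}</h3>
--                 <p style="color: #ECF0F1;">{person[1]} - {person[2]}</p>
--             </div>
--         """
--         birthday_cards += card_html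
--
--         # Insert a new row every 5 cards
--         if (index + 1) % 5 == 0 and index + 1 != len(birthday_data):
--             birthday_cards += "</div><div style='display: flex; flex-wrap: wrap; justify-content: center;'>"
--
--     return birthday_cards
-- ===== SOURCE B (Python) =====
-- def _card(person):
--     return f"""
--             <div style="margin: 10px; padding: 10px; background-color: rgba(255, 255, 255, 0.2); border-radius: 10px; width: 180px; text-align: center;">
--                 <h3 style="color: #FFD700;">Shri {person[0]}</h3>
--                 <p style="color: #ECF0F1;">{person[1]} - {person[2]}</p>
--             </div>
--         """
--
--
-- def generate_birthday_cards(birthday_data):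
--     groups = []
--     rest = birthday_data
--     while rest:
--         groups.append(rest[:5])
--         rest = rest[5:]
--     separator = "</div><div style='display: flex; flex-wrap: wrap; justify-content: center;'>"
--     return separator.join("".join(_card(p) for p in group) for group in groups)
-- ===== Notes on version B (the rewrite author's own statement) =====
-- stated objective: simpler
-- what changed: Replaces the indexed loop with its modulo/last-element row-break test by partitioning the list into groups of 5 and joining the per-group card strings with the row-break separator, which places separators only between groups.
import Mathlib
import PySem

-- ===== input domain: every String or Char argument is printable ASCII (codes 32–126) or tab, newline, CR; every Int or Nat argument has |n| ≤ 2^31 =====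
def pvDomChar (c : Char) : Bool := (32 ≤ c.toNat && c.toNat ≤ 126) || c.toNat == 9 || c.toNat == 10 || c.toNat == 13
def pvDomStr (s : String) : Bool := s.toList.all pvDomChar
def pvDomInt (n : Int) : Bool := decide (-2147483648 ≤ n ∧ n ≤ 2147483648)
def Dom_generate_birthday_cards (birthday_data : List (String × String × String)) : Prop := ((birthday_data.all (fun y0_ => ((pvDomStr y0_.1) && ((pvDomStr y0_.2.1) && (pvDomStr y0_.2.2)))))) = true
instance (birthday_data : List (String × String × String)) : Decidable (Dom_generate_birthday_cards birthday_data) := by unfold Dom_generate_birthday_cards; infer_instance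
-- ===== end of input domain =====

-- B replaces A's indexed loop with its modulo/last-index row-break test by chunking the list
-- into groups of 5 and joining the per-group card strings with the row-break separator (simpler decomposition).

-- the per-person card HTML (the f-string body, shared verbatim by both ports)
def pvCard (person : String × String × String) : String :=
  "\n            <div style=\"margin: 10px; padding: 10px; background-color: rgba(255, 255, 255, 0.2); border-radius: 10px; width: 180px; text-align: center;\">\n                <h3 style=\"color: #FFD700;\">Shri "
  ++ person.1 ++ "</h3>\n                <p style=\"color: #ECF0F1;\">" ++ person.2.1 ++ " - "
  ++ person.2.2 ++ "</p>\n            </div>\n        "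

def pvSep : String := "</div><div style='display: flex; flex-wrap: wrap; justify-content: center;'>"

-- ===== PORT A =====
def generate_birthday_cards (birthday_data : List (String × String × String)) : String :=
  (PySem.List.enumerate birthday_data 0).foldl
    (fun birthday_cards ip =>
      let birthday_cards := birthday_cards ++ pvCard ip.2
      if PySem.Int.mod (ip.1 + 1) 5 == 0 && ip.1 + 1 != (birthday_data.length : Int) then
        birthday_cards ++ pvSep
      else birthday_cards) ""

-- ===== PORT B =====
-- the while loop of Source B collecting rest[:5] groups; rest[:5] / rest[5:] are the slices PySem.List.slice
def pvChunks {α : Type} : List α → List (List α)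
  | [] => []
  | x :: xs => PySem.List.slice (x :: xs) none (some 5) :: pvChunks (PySem.List.slice (x :: xs) (some 5) none)
termination_by l => l.length
decreasing_by simp [PySem.List.slice_from]

def generate_birthday_cards_alt (birthday_data : List (String × String × String)) : String :=
  PySem.Str.join pvSep
    ((pvChunks birthday_data).map (fun group => PySem.Str.join "" (group.map pvCard)))

-- ===== PRECONDITION & SPEC =====
def Spec_generate_birthday_cards (birthday_data : List (String × String × String)) (out : String) : Prop := out = generate_birthday_cards_alt birthday_data
instance (birthday_data : List (String × String × String)) (out : String) : Decidable (Spec_generate_birthday_cards birthday_data out) := by unfold Spec_generate_birthday_cards; infer_instance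

-- ===== CLAIM (what is proved, stated in full; the proofs are below) =====
def Claim_equal_generate_birthday_cards : Prop := ∀ (birthday_data : List (String × String × String)), Dom_generate_birthday_cards birthday_data → Spec_generate_birthday_cards birthday_data (generate_birthday_cards birthday_data)

-- ===== LEMMAS AND PROOFS =====

lemma pv_mod (s : Int) : PySem.Int.mod s 5 = s % 5 := by
  simp [PySem.Int.mod]; rw [Int.fmod_eq_emod]; omega

lemma pv_join_nil (s : String) : PySem.Str.join s [] = "" := by
  simp [PySem.Str.join, PySem.Chars.join_nil]

lemma pv_join_singleton (s a : String) : PySem.Str.join s [a] = a := by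
  simp [PySem.Str.join, PySem.Chars.join_singleton]

lemma pv_join_cons_cons (s a b : String) (l : List String) :
    PySem.Str.join s (a :: b :: l) = a ++ (s ++ PySem.Str.join s (b :: l)) := by
  simp [PySem.Str.join, PySem.Chars.join_cons_cons]

-- what A's loop appends after having processed indices < s, with n the total length
def pvBody (n : Int) : Int → List (String × String × String) → String
  | _, [] => ""
  | s, p :: r =>
      (pvCard p ++ (if PySem.Int.mod (s + 1) 5 == 0 && s + 1 != n then pvSep else ""))
        ++ pvBody n (s + 1) r

lemma pvBody_cons (n s : Int) (p : String × String × String) (r : List (String × String × String)) :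
    pvBody n s (p :: r) =
      (pvCard p ++ (if PySem.Int.mod (s + 1) 5 == 0 && s + 1 != n then pvSep else ""))
        ++ pvBody n (s + 1) r := rfl

lemma pv_fold_eq (n : Int) (xs : List (String × String × String)) :
    ∀ (s : Int) (acc : String),
      (PySem.List.enumerate xs s).foldl
        (fun birthday_cards ip =>
          let birthday_cards := birthday_cards ++ pvCard ip.2
          if PySem.Int.mod (ip.1 + 1) 5 == 0 && ip.1 + 1 != n then
            birthday_cards ++ pvSep
          else birthday_cards) acc
      = acc ++ pvBody n s xs := by
  induction xs with
  | nil => intro s acc; simp [PySem.List.enumerate_nil, pvBody]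
  | cons p r ih =>
    intro s acc
    rw [PySem.List.enumerate_cons]
    simp only [List.foldl_cons]
    rw [ih, pvBody_cons]
    cases hc : (PySem.Int.mod (s + 1) 5 == 0 && s + 1 != n) <;>
      simp [hc, String.append_assoc]

lemma pvBody_nil (n s : Int) : pvBody n s [] = "" := rfl

lemma pvChunks_nil {α : Type} : pvChunks ([] : List α) = [] := by
  simp only [pvChunks]

lemma pvChunks_cons {α : Type} (x : α) (xs : List α) :
    pvChunks (x :: xs) = (x :: xs).take 5 :: pvChunks ((x :: xs).drop 5) := by
  simp only [pvChunks]
  simp [PySem.List.slice_to, PySem.List.slice_from]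

lemma pv_body_eq (N : Nat) : ∀ (xs : List (String × String × String)) (s n : Int),
    xs.length ≤ N → 0 ≤ s → s % 5 = 0 → n = s + xs.length →
    pvBody n s xs =
      PySem.Str.join pvSep ((pvChunks xs).map (fun group => PySem.Str.join "" (group.map pvCard))) := by
  induction N with
  | zero =>
    intro xs s n hlen h0 h5 hn
    have : xs = [] := List.length_eq_zero_iff.mp (Nat.le_zero.mp hlen)
    subst this
    simp [pvBody_nil, pvChunks_nil, pv_join_nil]
  | succ N ih =>
    intro xs s n hlen h0 h5 hn
    have m1 : (PySem.Int.mod (s + 1) 5 == 0 && s + 1 != n) = false := by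
      simp [pv_mod]; omega
    have m2 : (PySem.Int.mod (s + 1 + 1) 5 == 0 && s + 1 + 1 != n) = false := by
      simp [pv_mod]; omega
    have m3 : (PySem.Int.mod (s + 1 + 1 + 1) 5 == 0 && s + 1 + 1 + 1 != n) = false := by
      simp [pv_mod]; omega
    have m4 : (PySem.Int.mod (s + 1 + 1 + 1 + 1) 5 == 0 && s + 1 + 1 + 1 + 1 != n) = false := by
      simp [pv_mod]; omega
    match xs, hlen, hn with
    | [], _, _ => simp [pvBody_nil, pvChunks_nil, pv_join_nil]
    | [a], _, hn =>
      have h1 : (PySem.Int.mod (s + 1) 5 == 0 && s + 1 != n) = false := m1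
      rw [pvBody_cons, pvBody_nil, h1, pvChunks_cons]
      simp [pvChunks_nil, pv_join_singleton]
    | [a, b], _, hn =>
      rw [pvBody_cons, pvBody_cons, pvBody_nil, m1, m2, pvChunks_cons]
      simp [pvChunks_nil, pv_join_singleton, pv_join_cons_cons, String.append_assoc]
    | [a, b, c], _, hn =>
      rw [pvBody_cons, pvBody_cons, pvBody_cons, pvBody_nil, m1, m2, m3, pvChunks_cons]
      simp [pvChunks_nil, pv_join_singleton, pv_join_cons_cons, String.append_assoc]
    | [a, b, c, d], _, hn =>
      rw [pvBody_cons, pvBody_cons, pvBody_cons, pvBody_cons, pvBody_nil, m1, m2, m3, m4,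
        pvChunks_cons]
      simp [pvChunks_nil, pv_join_singleton, pv_join_cons_cons, String.append_assoc]
    | [a, b, c, d, e], _, hn =>
      have hn5 : n = s + 5 := by simp at hn; omega
      have m5f : (PySem.Int.mod (s + 1 + 1 + 1 + 1 + 1) 5 == 0 && s + 1 + 1 + 1 + 1 + 1 != n) = false := by
        simp [pv_mod]; omega
      rw [pvBody_cons, pvBody_cons, pvBody_cons, pvBody_cons, pvBody_cons, pvBody_nil,
        m1, m2, m3, m4, m5f, pvChunks_cons]
      simp [pvChunks_nil, pv_join_singleton, pv_join_cons_cons, String.append_assoc]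
    | a :: b :: c :: d :: e :: f :: rest, hlen, hn =>
      have hn6 : n = s + ((rest.length : Int) + 6) := by simp at hn; omega
      have m5 : (PySem.Int.mod (s + 1 + 1 + 1 + 1 + 1) 5 == 0 && s + 1 + 1 + 1 + 1 + 1 != n) = true := by
        simp [pv_mod]; omega
      have hihlen : (f :: rest).length ≤ N := by simp at hlen ⊢; omega
      have hih := ih (f :: rest) (s + 5) n hihlen (by omega) (by omega) (by simp; omega)
      rw [pvBody_cons, pvBody_cons, pvBody_cons, pvBody_cons, pvBody_cons, m1, m2, m3, m4, m5]
      have hs5 : s + 1 + 1 + 1 + 1 + 1 = s + 5 := by omega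
      rw [hs5, hih]
      have hC : pvChunks (a :: b :: c :: d :: e :: f :: rest)
          = [a, b, c, d, e] :: pvChunks (f :: rest) := by
        rw [pvChunks_cons]; simp
      rw [hC, List.map_cons]
      obtain ⟨g, gs, hg⟩ : ∃ g gs, pvChunks (f :: rest) = g :: gs := by
        rw [pvChunks_cons]; exact ⟨_, _, rfl⟩
      rw [hg, List.map_cons, pv_join_cons_cons]
      simp [pv_join_singleton, pv_join_cons_cons, String.append_assoc]

-- ===== VERDICT (by name: the statement is the Claim_ definition above) =====
theorem generate_birthday_cards_spec : Claim_equal_generate_birthday_cards := by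
  intro birthday_data _
  unfold Spec_generate_birthday_cards generate_birthday_cards generate_birthday_cards_alt
  rw [pv_fold_eq]
  rw [pv_body_eq birthday_data.length birthday_data 0 birthday_data.length le_rfl le_rfl (by decide) (by omega)]
  simp
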